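-- pv_equiv track=rewrite | github.com/viniciusrpb/cic0004_apc_engcomp_python | strings/beecrowd_1024.py | solve
-- ===== SOURCE A (Python) =====
-- def isLower(c):
--     if ord(c) >= 97 and ord(c) <= 122:
--         return True
--     else:
--         return False
--
-- def isUpper(c):
--     if ord(c) >= 65 and ord(c) <= 90:
--         return True
--     else:
--         return False
--
-- def solve(s):
--
--     #procedimento 1
--     s1 = ''
--     for carac in s:
--         if isLower(carac) == True or isUpper(carac) == True:
--             asc2 = ord(carac)+3
--             novo_carac = chr(asc2)
--             s1+=novo_carac # s1=s1+novo_carac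
--         else:
--             s1+=carac # s1=s1+carac
--
--     # procedimento 2
--     s2 = s1[::-1]
--
--     #procedimento 3
--     n = len(s2)
--     s3 = s2[0:n//2] #substring formada pelos caracteres no intervalo [0,1,2,...,n//2)
--     for i in range(n//2,n):
--         caractere = s2[i]
--         asc2 = ord(caractere)-1
--         novo_carac = chr(asc2)
--         s3=s3+novo_carac
--
--     return s3
-- ===== SOURCE B (Python) =====
-- def solve(s):
--     n = len(s)
--
--     def out_char(i):
--         c = ord(s[n - 1 - i])
--         if 65 <= c <= 90 or 97 <= c <= 122:
--             c += 3
--         if i >= n // 2: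
--             c -= 1
--         return chr(c)
--
--     return ''.join(out_char(i) for i in range(n))
-- ===== Notes on version B (the rewrite author's own statement) =====
-- stated objective: simpler
-- what changed: Replaces A's three sequential passes (build shifted string by repeated concatenation, reverse it, rebuild decrementing the second half) with a single per-output-position formula: character i of the result is computed directly from s[n-1-i] with the shift and the conditional decrement fused, collected via join.
import Mathlib
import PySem

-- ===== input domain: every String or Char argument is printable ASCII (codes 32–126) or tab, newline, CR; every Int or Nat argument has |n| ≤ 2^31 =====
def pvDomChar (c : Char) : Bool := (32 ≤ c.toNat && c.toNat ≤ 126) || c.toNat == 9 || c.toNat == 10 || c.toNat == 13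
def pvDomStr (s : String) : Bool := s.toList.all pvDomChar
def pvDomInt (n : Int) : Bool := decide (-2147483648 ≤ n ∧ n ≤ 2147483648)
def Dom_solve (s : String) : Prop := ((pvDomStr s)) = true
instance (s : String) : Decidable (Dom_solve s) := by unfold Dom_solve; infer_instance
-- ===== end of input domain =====

-- B fuses A's three passes (shift letters by +3 with string concatenation, reverse,
-- rebuild decrementing the second half) into one per-output-position formula; objective: simpler.

-- ===== PORT A =====
def isLowerA (c : Char) : Bool :=
  if 97 ≤ c.toNat ∧ c.toNat ≤ 122 then true else false

def isUpperA (c : Char) : Bool :=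
  if 65 ≤ c.toNat ∧ c.toNat ≤ 90 then true else false

def solveChars (s : List Char) : List Char :=
  -- procedimento 1
  let s1 := s.foldl (fun acc c =>
    if isLowerA c = true ∨ isUpperA c = true then acc ++ [Char.ofNat (c.toNat + 3)]
    else acc ++ [c]) []
  -- procedimento 2: s1[::-1]
  let s2 := (PySem.List.slice? s1 none none (-1)).getD []
  -- procedimento 3
  let n : Int := s2.length
  let s3 := PySem.List.slice s2 (some 0) (some (PySem.Int.floordiv n 2))
  (PySem.List.pyRange (PySem.Int.floordiv n 2) n 1).foldl
    (fun acc i => acc ++ [Char.ofNat ((PySem.List.pyGetD s2 i ' ').toNat - 1)]) s3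

def solve (s : String) : String := String.ofList (solveChars s.toList)

-- ===== PORT B =====
def outCharB (l : List Char) (n i : Nat) : Char :=
  let c0 := (PySem.List.pyGetD l ((n : Int) - 1 - (i : Int)) ' ').toNat
  let c1 := if (65 ≤ c0 ∧ c0 ≤ 90) ∨ (97 ≤ c0 ∧ c0 ≤ 122) then c0 + 3 else c0
  let c2 := if n / 2 ≤ i then c1 - 1 else c1
  Char.ofNat c2

def solve_alt (s : String) : String :=
  let l := s.toList
  let n := l.length
  String.ofList ((List.range n).map (outCharB l n))

-- ===== PRECONDITION & SPEC =====
def Spec_solve (s : String) (out : String) : Prop := out = solve_alt s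
instance (s : String) (out : String) : Decidable (Spec_solve s out) := by unfold Spec_solve; infer_instance

-- ===== CLAIM (what is proved, stated in full; the proofs are below) =====
def Claim_equal_solve : Prop := ∀ (s : String), Dom_solve s → Spec_solve s (solve s)

-- ===== LEMMAS AND PROOFS =====

def shiftA (c : Char) : Char :=
  if isLowerA c = true ∨ isUpperA c = true then Char.ofNat (c.toNat + 3) else c

lemma toNat_ofNat_small (n : Nat) (h : n < 1000) : (Char.ofNat n).toNat = n := by
  rw [Char.toNat_ofNat, if_pos]; exact Or.inl (by omega)

lemma isLowerA_eq (c : Char) : isLowerA c = true ↔ (97 ≤ c.toNat ∧ c.toNat ≤ 122) := by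
  simp [isLowerA]

lemma isUpperA_eq (c : Char) : isUpperA c = true ↔ (65 ≤ c.toNat ∧ c.toNat ≤ 90) := by
  simp [isUpperA]

lemma shiftA_spec (c : Char) :
    shiftA c = if (65 ≤ c.toNat ∧ c.toNat ≤ 90) ∨ (97 ≤ c.toNat ∧ c.toNat ≤ 122)
      then Char.ofNat (c.toNat + 3) else c := by
  by_cases h : (65 ≤ c.toNat ∧ c.toNat ≤ 90) ∨ (97 ≤ c.toNat ∧ c.toNat ≤ 122)
  · rw [if_pos h]; unfold shiftA; rw [if_pos]; rw [isLowerA_eq, isUpperA_eq]; tauto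
  · rw [if_neg h]; unfold shiftA; rw [if_neg]; rw [isLowerA_eq, isUpperA_eq]; tauto

lemma toNat_shiftA (c : Char) :
    (shiftA c).toNat = if (65 ≤ c.toNat ∧ c.toNat ≤ 90) ∨ (97 ≤ c.toNat ∧ c.toNat ≤ 122)
      then c.toNat + 3 else c.toNat := by
  rw [shiftA_spec]
  split_ifs with h
  · exact toNat_ofNat_small _ (by omega)
  · rfl

-- A's result as take/drop/map of the shifted-and-reversed list
lemma solveChars_eq (s : List Char) :
    solveChars s =
      ((s.map shiftA).reverse.take (s.length / 2)) ++
      ((s.map shiftA).reverse.drop (s.length / 2)).map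
        (fun c => Char.ofNat (c.toNat - 1)) := by
  have h1 : ∀ (acc : List Char),
      s.foldl (fun acc c =>
        if isLowerA c = true ∨ isUpperA c = true then acc ++ [Char.ofNat (c.toNat + 3)]
        else acc ++ [c]) acc = acc ++ s.map shiftA := by
    intro acc
    have := PySem.List.foldl_append_singleton_eq_map (l := s) (f := shiftA) (acc := acc)
    rw [← this]
    congr 1; funext a c
    by_cases h : isLowerA c = true ∨ isUpperA c = true <;> simp [shiftA, h]
  simp only [solveChars]
  rw [h1, List.nil_append, PySem.List.slice?_none_none_neg_one]
  simp only [Option.getD_some, List.length_reverse, List.length_map]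
  have hfd : PySem.Int.floordiv (s.length : Int) 2 = ((s.length / 2 : Nat) : Int) := by
    exact_mod_cast PySem.Int.floordiv_natCast s.length 2
  rw [hfd, PySem.List.slice_zero_start, PySem.List.slice_to_natCast]
  rw [PySem.List.foldl_append_singleton_eq_map
    (l := PySem.List.pyRange ((s.length / 2 : Nat) : Int) ((s.length : Nat) : Int) 1)
    (f := fun i => Char.ofNat ((PySem.List.pyGetD (s.map shiftA).reverse i ' ').toNat - 1))
    (acc := (s.map shiftA).reverse.take (s.length / 2))]
  congr 1
  have h3 := PySem.List.map_pyGetD_pyRange' (xs := (s.map shiftA).reverse) (d := ' ')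
    (a := ((s.length / 2 : Nat) : Int)) (by positivity)
  simp only [List.length_reverse, List.length_map, Int.toNat_natCast] at h3
  rw [show (fun i => Char.ofNat ((PySem.List.pyGetD (s.map shiftA).reverse i ' ').toNat - 1))
      = (fun c => Char.ofNat (c.toNat - 1)) ∘
        (fun j => PySem.List.pyGetD (s.map shiftA).reverse j ' ') from rfl,
    ← List.map_map, h3]

lemma getElem_rev_map (l : List Char) (i : Nat) (hi : i < l.length) :
    (l.map shiftA).reverse[i]'(by simpa using hi) = shiftA (l[l.length - 1 - i]'(by omega)) := by
  rw [List.getElem_reverse, List.getElem_map]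
  exact congrArg shiftA (getElem_congr rfl (by simp) (by simp; omega))

lemma outCharB_eq (l : List Char) (i : Nat) (hi : i < l.length) :
    outCharB l l.length i =
      if l.length / 2 ≤ i then
        Char.ofNat (((l.map shiftA).reverse[i]'(by simpa using hi)).toNat - 1)
      else (l.map shiftA).reverse[i]'(by simpa using hi) := by
  have hidx : PySem.List.pyGetD l ((l.length : Int) - 1 - (i : Int)) ' '
      = l[l.length - 1 - i]'(by omega) := by
    have h0 : ((l.length : Int) - 1 - (i : Int)) = ((l.length - 1 - i : Nat) : Int) := by
      push_cast [Nat.sub_sub]; omega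
    rw [h0, PySem.List.pyGetD_natCast, List.getD_eq_getElem]
  rw [getElem_rev_map l i hi, toNat_shiftA, shiftA_spec]
  simp only [outCharB, hidx]
  by_cases hlet : (65 ≤ (l[l.length - 1 - i]'(by omega)).toNat ∧
        (l[l.length - 1 - i]'(by omega)).toNat ≤ 90) ∨
      (97 ≤ (l[l.length - 1 - i]'(by omega)).toNat ∧
        (l[l.length - 1 - i]'(by omega)).toNat ≤ 122)
  · rw [if_pos hlet, if_pos hlet, apply_ite Char.ofNat]
  · rw [if_neg hlet, if_neg hlet, apply_ite Char.ofNat]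
    by_cases hhalf : l.length / 2 ≤ i
    · rw [if_pos hhalf, if_pos hhalf]
    · rw [if_neg hhalf, if_neg hhalf, Char.ofNat_toNat]

lemma chars_eq (l : List Char) :
    solveChars l = (List.range l.length).map (outCharB l l.length) := by
  rw [solveChars_eq]
  have hrevlen : (l.map shiftA).reverse.length = l.length := by simp
  apply List.ext_getElem
  · simp; omega
  · intro i h1 h2
    have hi : i < l.length := by simpa using h2
    rw [List.getElem_map, List.getElem_range, outCharB_eq l i hi]
    by_cases hhalf : l.length / 2 ≤ i
    · rw [if_pos hhalf, List.getElem_append_right (by simp [hrevlen]; omega)]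
      simp only [List.getElem_map, List.getElem_drop, List.length_take, hrevlen]
      exact congrArg (fun c : Char => Char.ofNat (c.toNat - 1))
        (getElem_congr rfl (by omega) (by simp; omega))
    · rw [if_neg hhalf, List.getElem_append_left (by simp [hrevlen]; omega),
        List.getElem_take]

-- ===== VERDICT (by name: the statement is the Claim_ definition above) =====
theorem solve_spec : Claim_equal_solve := by
  intro s _hdom
  unfold Spec_solve solve solve_alt
  rw [chars_eq s.toList]
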